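-- pv_equiv track=rewrite | github.com/FixerLT/labs | discrete math/lab_3.py | convert_dk
-- ===== SOURCE A (Python) =====
-- def to_str(arr):
--     return ''.join(reversed([str(e) for e in arr]))
--
-- def convert_dk(arr):
--     log = to_str(arr) + ' = '
--     bck = 1 - arr[-1]
--     num = 0
--     if bck == 0:
--         log += '-('
--     sign_flag = False
--     for i in range(len(arr)-1):
--         if arr[i] == bck:
--             if sign_flag:
--                 log += ' + '
--             else:
--                 sign_flag = True
--             num += 2**i * (1 if arr[i] == bck else 0)
--             log += '2^' + str(i)
--     if bck == 0:
--         log += ')'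
--     log += ' = '
--     if bck == 0:
--         log += '-'
--     log += str(num)
--     return log
-- ===== SOURCE B (Python) =====
-- def convert_dk(arr):
--     bck = 1 - arr[-1]
--     num = 0
--     pieces = []
--     for i in range(len(arr) - 2, -1, -1):
--         num = 2 * num + (1 if arr[i] == bck else 0)
--         if arr[i] == bck:
--             pieces.append('2^' + str(i))
--     pieces.reverse()
--     term = ' + '.join(pieces)
--     prefix = ''.join(reversed([str(e) for e in arr]))
--     if bck == 0:
--         return prefix + ' = -(' + term + ') = -' + str(num)
--     return prefix + ' = ' + term + ' = ' + str(num)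
-- ===== Notes on version B (the rewrite author's own statement) =====
-- stated objective: alternative
-- what changed: A scans the bits left-to-right with a sign_flag, appending '2^i' terms to the log as it goes and adding precomputed powers 2**i; B traverses the bits from the HIGH index down, accumulating the numeric value by Horner's rule (num = 2*num + bit, no power computation), collecting the kept terms back-to-front into a list that is reversed and joined once at the end.
import Mathlib
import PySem

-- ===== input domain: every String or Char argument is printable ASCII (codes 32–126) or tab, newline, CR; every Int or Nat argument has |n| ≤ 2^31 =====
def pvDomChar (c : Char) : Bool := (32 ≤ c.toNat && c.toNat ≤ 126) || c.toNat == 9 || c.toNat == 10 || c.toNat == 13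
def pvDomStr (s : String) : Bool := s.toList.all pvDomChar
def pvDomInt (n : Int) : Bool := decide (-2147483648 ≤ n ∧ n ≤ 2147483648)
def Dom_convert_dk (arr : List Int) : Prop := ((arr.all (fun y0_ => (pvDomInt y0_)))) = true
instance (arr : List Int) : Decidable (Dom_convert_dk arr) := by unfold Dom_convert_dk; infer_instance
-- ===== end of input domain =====

-- B replaces A's forward sign_flag loop (powers 2**i, append-as-you-go) by a high-to-low
-- traversal: Horner accumulation of the value, terms collected back-to-front and joined once.

-- ===== PORT A =====
-- helper to_str: ''.join(reversed([str(e) for e in arr]))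
def pv_to_str (arr : List Int) : List Char :=
  PySem.Chars.join [] ((arr.map PySem.Int.toChars).reverse)

-- the body of A's for-loop, state = (log, num, sign_flag)
def pvStepA (arr : List Int) (bck : Int) (st : List Char × Int × Bool) (i : Nat) :
    List Char × Int × Bool :=
  if arr.getD i 0 == bck then
    ((st.1 ++ (if st.2.2 then " + ".toList else [])) ++ ("2^".toList ++ PySem.Int.toChars (i : Int)),
     st.2.1 + (2 : Int) ^ i * (if arr.getD i 0 == bck then 1 else 0),
     true)
  else st

def convert_dk (arr : List Int) : String :=
  let log0 := pv_to_str arr ++ " = ".toList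
  -- arr[-1]: the IndexError on empty arr is excluded by Pre_convert_dk (getD's 0 is never used inside Pre_)
  let bck : Int := 1 - (PySem.List.pyGet? arr (-1)).getD 0
  let log1 := if bck == 0 then log0 ++ "-(".toList else log0
  -- for i in range(len(arr)-1): indices 0 .. len-2, arr[i] always in range
  let res := (List.range (arr.length - 1)).foldl (pvStepA arr bck) (log1, (0 : Int), false)
  let log2 := if bck == 0 then res.1 ++ ")".toList else res.1
  let log3 := log2 ++ " = ".toList
  let log4 := if bck == 0 then log3 ++ "-".toList else log3
  String.ofList (log4 ++ PySem.Int.toChars res.2.1)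

-- ===== PORT B =====
-- '2^' + str(i)
def pvPiece (i : Nat) : List Char := "2^".toList ++ PySem.Int.toChars (i : Int)

-- the body of B's downward for-loop, state = (num, pieces)
def pvStepB (arr : List Int) (bck : Int) (st : Int × List (List Char)) (i : Nat) :
    Int × List (List Char) :=
  (2 * st.1 + (if arr.getD i 0 == bck then 1 else 0),
   if arr.getD i 0 == bck then st.2 ++ [pvPiece i] else st.2)

def convert_dk_alt (arr : List Int) : String :=
  -- arr[-1]: the IndexError on empty arr is excluded by Pre_convert_dk
  let bck : Int := 1 - (PySem.List.pyGet? arr (-1)).getD 0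
  -- for i in range(len(arr)-2, -1, -1): indices len-2 .. 0, descending
  let res := ((List.range (arr.length - 1)).reverse).foldl (pvStepB arr bck)
    ((0 : Int), ([] : List (List Char)))
  -- pieces.reverse(); term = ' + '.join(pieces)
  let term := PySem.Chars.join " + ".toList res.2.reverse
  -- prefix = ''.join(reversed([str(e) for e in arr]))
  let pre := PySem.Chars.join [] ((arr.map PySem.Int.toChars).reverse)
  if bck == 0 then
    String.ofList (pre ++ " = -(".toList ++ term ++ ") = -".toList ++ PySem.Int.toChars res.1)
  else
    String.ofList (pre ++ " = ".toList ++ term ++ " = ".toList ++ PySem.Int.toChars res.1)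

-- ===== PRECONDITION & SPEC =====
-- Pre_ excludes only the empty list, on which Python's arr[-1] raises IndexError.
def Pre_convert_dk (arr : List Int) : Prop := arr ≠ []
instance (arr : List Int) : Decidable (Pre_convert_dk arr) := by unfold Pre_convert_dk; infer_instance
def pvWitness_convert_dk : List Int := ([1, 0, 1])

def Spec_convert_dk (arr : List Int) (out : String) : Prop := out = convert_dk_alt arr
instance (arr : List Int) (out : String) : Decidable (Spec_convert_dk arr out) := by unfold Spec_convert_dk; infer_instance

-- ===== CLAIM (what is proved, stated in full; the proofs are below) =====
def Claim_equal_convert_dk : Prop := ∀ (arr : List Int), Dom_convert_dk arr → Pre_convert_dk arr → Spec_convert_dk arr (convert_dk arr)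

-- ===== LEMMAS AND PROOFS =====

-- the string A's loop appends after `log1`, as a function of the remaining flag and the kept indices
def pvJoinTail (flag : Bool) (l : List Nat) : List Char :=
  match l with
  | [] => []
  | i :: rest => (if flag then " + ".toList else []) ++ pvPiece i ++ pvJoinTail true rest

theorem pv_loop_eq (arr : List Int) (bck : Int) :
    ∀ (l : List Nat) (log : List Char) (num : Int) (flag : Bool),
    l.foldl (pvStepA arr bck) (log, num, flag) =
      (log ++ pvJoinTail flag (l.filter (fun i => arr.getD i 0 == bck)),
       num + ((l.filter (fun i => arr.getD i 0 == bck)).map (fun i => (2 : Int) ^ i)).sum,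
       flag || !(l.filter (fun i => arr.getD i 0 == bck)).isEmpty) := by
  intro l
  induction l with
  | nil => intro log num flag; simp [pvJoinTail]
  | cons i rest ih =>
    intro log num flag
    by_cases h : arr.getD i 0 == bck
    · have hf : List.filter (fun j => arr.getD j 0 == bck) (i :: rest)
          = i :: List.filter (fun j => arr.getD j 0 == bck) rest := List.filter_cons_of_pos h
      rw [List.foldl_cons, hf]
      simp only [pvStepA, if_pos h, ih]
      simp [pvJoinTail, pvPiece, List.append_assoc, mul_one, add_assoc]
    · have hf : List.filter (fun j => arr.getD j 0 == bck) (i :: rest)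
          = List.filter (fun j => arr.getD j 0 == bck) rest := List.filter_cons_of_neg h
      rw [List.foldl_cons, hf]
      simp only [pvStepA, if_neg h]
      exact ih log num flag

-- B's backward Horner loop, characterised on range m
theorem pv_loopB_eq (arr : List Int) (bck : Int) :
    ∀ (m : Nat) (n0 : Int) (p0 : List (List Char)),
    ((List.range m).reverse).foldl (pvStepB arr bck) (n0, p0) =
      (n0 * 2 ^ m + (((List.range m).filter (fun i => arr.getD i 0 == bck)).map (fun i => (2 : Int) ^ i)).sum,
       p0 ++ (((List.range m).filter (fun i => arr.getD i 0 == bck)).reverse.map pvPiece)) := by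
  intro m
  induction m with
  | zero => intro n0 p0; simp
  | succ m ih =>
    intro n0 p0
    rw [List.range_succ, List.reverse_append, List.filter_append]
    simp only [List.reverse_singleton, List.singleton_append, List.foldl_cons, ih]
    by_cases h : arr.getD m 0 == bck
    · have hb : arr.getD m 0 = bck := beq_iff_eq.mp h
      have hfp : List.filter (fun i => arr.getD i 0 == bck) [m] = [m] := by
        simp [show arr[m]?.getD 0 = bck from hb]
      simp only [pvStepB, if_pos h, hfp, List.reverse_append, List.reverse_singleton,
        List.singleton_append, List.map_append, List.map_cons, List.map_nil, List.sum_append,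
        List.sum_cons, List.sum_nil, add_zero, Prod.mk.injEq]
      constructor
      · ring
      · simp [List.append_assoc]
    · have hb : ¬ arr.getD m 0 = bck := by simpa using h
      have hf : List.filter (fun i => arr.getD i 0 == bck) [m] = [] := by
        simp [show ¬ arr[m]?.getD 0 = bck from hb]
      simp only [pvStepB, if_neg h, hf, List.append_nil, Prod.mk.injEq]
      exact ⟨by ring, trivial⟩

theorem pv_join_aux (l : List Nat) : ∀ (a : List Char),
    PySem.Chars.join " + ".toList (a :: l.map pvPiece) = a ++ pvJoinTail true l := by
  induction l with
  | nil => intro a; simp [PySem.Chars.join_singleton, pvJoinTail]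
  | cons i rest ih =>
    intro a
    simp only [List.map_cons, PySem.Chars.join_cons_cons, ih, pvJoinTail]
    simp [List.append_assoc]

theorem pv_join_eq (l : List Nat) :
    PySem.Chars.join " + ".toList (l.map pvPiece) = pvJoinTail false l := by
  cases l with
  | nil => simp [PySem.Chars.join_nil, pvJoinTail]
  | cons i rest =>
    rw [List.map_cons, pv_join_aux]
    simp [pvJoinTail]

-- ===== VERDICT (by name: the statement is the Claim_ definition above) =====
theorem convert_dk_spec : Claim_equal_convert_dk := by
  intro arr _ _
  unfold Spec_convert_dk convert_dk convert_dk_alt pv_to_str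
  simp only [pv_loop_eq, pv_loopB_eq, List.nil_append, List.map_reverse,
    List.reverse_reverse, pv_join_eq]
  by_cases h : (1 - (PySem.List.pyGet? arr (-1)).getD 0) == 0 <;>
    simp [h, List.append_assoc]
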